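-- pv_equiv track=rewrite | github.com/Neeraj04-CY/TuskAct3-Agent | eikon_engine/learning/index.py | infer_mission_type
-- ===== SOURCE A (Python) =====
-- from typing import Dict, Iterable, List, Optional, Sequence, Tuple
--
-- def infer_mission_type(text: Optional[str]) -> str:
--     """Match mission instructions to the coarse buckets used by learning logs."""
--
--     if not text:
--         return "unknown"
--     lowered = text.lower()
--     if "login" in lowered:
--         return "login"
--     if any(token in lowered for token in ("list", "listing")):
--         return "listing"
--     if any(token in lowered for token in ("extract", "scrape", "harvest")):
--         return "extraction"
--     if "dashboard" in lowered:
--         return "dashboard"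
--     return "unknown"
-- ===== SOURCE B (Python) =====
-- TOKENS = {
--     "login": (0, "login"),
--     "list": (1, "listing"),
--     "listing": (1, "listing"),
--     "extract": (2, "extraction"),
--     "scrape": (2, "extraction"),
--     "harvest": (2, "extraction"),
--     "dashboard": (3, "dashboard"),
-- }
--
-- def infer_mission_type(text):
--     if not text:
--         return "unknown"
--     lowered = text.lower()
--     matches = [v for tok, v in TOKENS.items() if tok in lowered]
--     return min(matches)[1] if matches else "unknown"
-- ===== Notes on version B (the rewrite author's own statement) =====
-- stated objective: alternative
-- what changed: B abandons A's ordered early-return chain: it scans every token unconditionally, collects all matching (priority, label) pairs, and returns the label of the minimum-priority match (Python min over lexicographic tuples), falling back to the default bucket when nothing matches.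
import Mathlib
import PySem

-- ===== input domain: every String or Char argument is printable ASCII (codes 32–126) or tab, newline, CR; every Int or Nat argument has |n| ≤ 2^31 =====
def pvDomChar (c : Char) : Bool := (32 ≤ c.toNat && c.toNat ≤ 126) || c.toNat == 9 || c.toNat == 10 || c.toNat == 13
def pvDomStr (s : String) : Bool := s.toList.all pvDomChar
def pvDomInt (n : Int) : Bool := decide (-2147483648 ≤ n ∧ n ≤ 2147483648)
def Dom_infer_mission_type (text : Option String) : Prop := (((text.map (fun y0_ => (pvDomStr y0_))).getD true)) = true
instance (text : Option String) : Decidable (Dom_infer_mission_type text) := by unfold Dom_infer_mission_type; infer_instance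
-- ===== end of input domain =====

-- ===== PORT A =====
-- B replaces A's ordered early-return chain by a full scan collecting all (priority,label) matches and taking the minimum (alternative decomposition, same cost).
def infer_mission_type (text : Option String) : String :=
  match text with
  | none => "unknown"
  | some t =>
    if t = "" then "unknown"
    else
      let lowered := PySem.Str.lower t
      if PySem.Str.isIn "login" lowered then "login"
      else if ["list", "listing"].any (fun tok => PySem.Str.isIn tok lowered) then "listing"
      else if ["extract", "scrape", "harvest"].any (fun tok => PySem.Str.isIn tok lowered) then "extraction"
      else if PySem.Str.isIn "dashboard" lowered then "dashboard"
      else "unknown"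

-- ===== PORT B =====
def pvTokens : List (String × (Nat × String)) :=
  [("login", (0, "login")),
   ("list", (1, "listing")),
   ("listing", (1, "listing")),
   ("extract", (2, "extraction")),
   ("scrape", (2, "extraction")),
   ("harvest", (2, "extraction")),
   ("dashboard", (3, "dashboard"))]

-- Python's lexicographic '<' on (int, str) tuples; min keeps the first minimal element.
def pvPairLt (x b : Nat × String) : Bool :=
  decide (x.1 < b.1) || (decide (x.1 = b.1) && decide (x.2 < b.2))

def infer_mission_type_alt (text : Option String) : String :=
  match text with
  | none => "unknown"
  | some t =>
    if t = "" then "unknown"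
    else
      let lowered := PySem.Str.lower t
      let found := (pvTokens.filter (fun p => PySem.Str.isIn p.1 lowered)).map Prod.snd
      match found with
      | [] => "unknown"
      | m :: ms => (ms.foldl (fun best x => if pvPairLt x best then x else best) m).2

-- ===== PRECONDITION & SPEC =====
def Spec_infer_mission_type (text : Option String) (out : String) : Prop := out = infer_mission_type_alt text
instance (text : Option String) (out : String) : Decidable (Spec_infer_mission_type text out) := by unfold Spec_infer_mission_type; infer_instance

-- ===== CLAIM (what is proved, stated in full; the proofs are below) =====
def Claim_equal_infer_mission_type : Prop := ∀ (text : Option String), Dom_infer_mission_type text → Spec_infer_mission_type text (infer_mission_type text)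

-- ===== LEMMAS AND PROOFS =====

-- ===== VERDICT =====
theorem infer_mission_type_spec : Claim_equal_infer_mission_type := by
  intro text _
  unfold Spec_infer_mission_type infer_mission_type infer_mission_type_alt
  cases text with
  | none => rfl
  | some t =>
    by_cases h : t = ""
    · simp [h]
    · simp only [h, if_false]
      set L := (PySem.Str.lower t).toList with hL
      by_cases h1 : PySem.Chars.isIn "login".toList L <;>
      by_cases h2 : PySem.Chars.isIn "list".toList L <;>
      by_cases h3 : PySem.Chars.isIn "listing".toList L <;>
      by_cases h4 : PySem.Chars.isIn "extract".toList L <;>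
      by_cases h5 : PySem.Chars.isIn "scrape".toList L <;>
      by_cases h6 : PySem.Chars.isIn "harvest".toList L <;>
      by_cases h7 : PySem.Chars.isIn "dashboard".toList L <;>
        simp_all [pvTokens, pvPairLt, PySem.Str.isIn, List.filter, List.foldl, String.toList]
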